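-- pv_equiv track=rewrite | github.com/chanthomas20180908-cpu/remotion_test_005 | .opencode/skills/motion-graphic-director/scripts/frame_calculator.py | compute_timeline
-- ===== SOURCE A (Python) =====
-- def compute_timeline(durations: list[int], transition_duration: int):
--     """
--     Compute absolute start/end for every scene and every transition window.
--
--     TransitionSeries maths:
--       - Each transition OVERLAPS the tail of the exiting scene and the head of
--         the entering scene by `transition_duration` frames.
--       - Scene N+1's local frame 0 starts at the same absolute frame as the
--         start of transition N.
--       - TOTAL = sum(durations) - (num_scenes - 1) * transition_duration
--
--     Returns:
--       scene_starts  : list[int]  absolute start of each scene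
--       scene_ends    : list[int]  absolute end of each scene (inclusive)
--       transitions   : list[tuple[int,int]]  (abs_start, abs_end) of each transition window
--       total         : int  total composition frames
--     """
--     n = len(durations)
--     scene_starts = []
--     scene_ends = []
--     transitions = []
--
--     abs_start = 0
--     for i, dur in enumerate(durations):
--         scene_starts.append(abs_start)
--         scene_ends.append(abs_start + dur - 1)
--
--         if i < n - 1:
--             # Transition window = last `transition_duration` frames of this scene
--             # = first `transition_duration` frames of the next scene (overlap)
--             trans_abs_start = abs_start + dur - transition_duration
--             trans_abs_end   = abs_start + dur - 1
--             transitions.append((trans_abs_start, trans_abs_end))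
--             # Next scene's local-0 = abs frame where the transition starts
--             abs_start = trans_abs_start
--
--     total = sum(durations) - (n - 1) * transition_duration
--     return scene_starts, scene_ends, transitions, total
-- ===== SOURCE B (Python) =====
-- def compute_timeline(durations: list[int], transition_duration: int):
--     # Prefix-sum decomposition: each component computed independently by formula.
--     prefix = [0]
--     for d in durations:
--         prefix.append(prefix[-1] + d)
--     starts = [p - i * transition_duration for i, p in enumerate(prefix[:-1])]
--     ends = [s + d - 1 for s, d in zip(starts, durations)]
--     transitions = [(e - transition_duration + 1, e) for e in ends[:-1]]
--     total = prefix[-1] - (len(durations) - 1) * transition_duration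
--     return starts, ends, transitions, total
-- ===== Notes on version B (the rewrite author's own statement) =====
-- stated objective: alternative
-- what changed: Replaces the single stateful loop threading abs_start through a conditional transition branch by a prefix-sum list built once, from which starts, ends and transitions are each derived independently by closed-form comprehensions (starts[i] = prefix[i] - i*t, ends from zip, transitions from ends[:-1]).
import Mathlib
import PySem

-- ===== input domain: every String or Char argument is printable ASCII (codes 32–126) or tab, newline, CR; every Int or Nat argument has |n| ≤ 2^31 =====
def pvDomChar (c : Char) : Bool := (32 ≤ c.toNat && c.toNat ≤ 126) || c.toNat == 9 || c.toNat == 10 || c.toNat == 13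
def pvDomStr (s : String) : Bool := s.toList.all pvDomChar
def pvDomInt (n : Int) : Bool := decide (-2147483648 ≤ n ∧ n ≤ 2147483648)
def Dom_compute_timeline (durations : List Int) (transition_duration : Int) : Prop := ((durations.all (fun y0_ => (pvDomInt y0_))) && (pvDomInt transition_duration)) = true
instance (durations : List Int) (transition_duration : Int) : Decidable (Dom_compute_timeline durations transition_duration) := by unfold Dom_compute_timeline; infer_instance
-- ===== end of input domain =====

-- B replaces A's single stateful loop (threading abs_start through a conditional branch)
-- by a prefix-sum list built once, from which starts, ends and transitions are each
-- derived independently by comprehensions; same O(n) cost (objective: alternative).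

-- ===== PORT A =====
-- A's loop body, with the captured n and transition_duration as explicit parameters.
def stepA (n t : Int) (s : List Int × List Int × List (Int × Int) × Int)
    (p : Int × Int) : List Int × List Int × List (Int × Int) × Int :=
  let abs_start := s.2.2.2
  let scene_starts := s.1 ++ [abs_start]
  let scene_ends := s.2.1 ++ [abs_start + p.2 - 1]
  if p.1 < n - 1 then
    (scene_starts, scene_ends,
     s.2.2.1 ++ [(abs_start + p.2 - t, abs_start + p.2 - 1)],
     abs_start + p.2 - t)
  else
    (scene_starts, scene_ends, s.2.2.1, abs_start)

def compute_timeline (durations : List Int) (transition_duration : Int) :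
    List Int × List Int × (List (Int × Int)) × Int :=
  let n : Int := durations.length
  let st := (PySem.List.enumerate durations 0).foldl
      (stepA n transition_duration) ([], [], [], 0)
  (st.1, st.2.1, st.2.2.1, durations.sum - (n - 1) * transition_duration)

-- ===== PORT B =====
def compute_timeline_alt (durations : List Int) (transition_duration : Int) :
    List Int × List Int × (List (Int × Int)) × Int :=
  -- prefix = [0]; for d in durations: prefix.append(prefix[-1] + d)
  -- prefix is always nonempty, so prefix[-1] = pyGetD … (-1) _ is exact here.
  let pfx := durations.foldl
      (fun (p : List Int) d => p ++ [PySem.List.pyGetD p (-1) 0 + d]) [0]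
  -- starts = [p - i*t for i, p in enumerate(prefix[:-1])]   (prefix[:-1] = dropLast)
  let starts := (PySem.List.enumerate pfx.dropLast 0).map
      (fun q => q.2 - q.1 * transition_duration)
  -- ends = [s + d - 1 for s, d in zip(starts, durations)]
  let ends := (starts.zip durations).map (fun q => q.1 + q.2 - 1)
  -- transitions = [(e - t + 1, e) for e in ends[:-1]]
  let transitions := ends.dropLast.map
      (fun e => (e - transition_duration + 1, e))
  let total := PySem.List.pyGetD pfx (-1) 0 -
      ((durations.length : Int) - 1) * transition_duration
  (starts, ends, transitions, total)

-- ===== PRECONDITION & SPEC =====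
def Spec_compute_timeline (durations : List Int) (transition_duration : Int) (out : List Int × List Int × (List (Int × Int)) × Int) : Prop := out = compute_timeline_alt durations transition_duration
instance (durations : List Int) (transition_duration : Int) (out : List Int × List Int × (List (Int × Int)) × Int) : Decidable (Spec_compute_timeline durations transition_duration out) := by unfold Spec_compute_timeline; infer_instance

-- ===== CLAIM (what is proved, stated in full; the proofs are below) =====
def Claim_equal_compute_timeline : Prop := ∀ (durations : List Int) (transition_duration : Int), Dom_compute_timeline durations transition_duration → Spec_compute_timeline durations transition_duration (compute_timeline durations transition_duration)

-- ===== LEMMAS AND PROOFS =====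

-- Common closed-form recursions both ports are reduced to.
def gStarts (a t : Int) : List Int → List Int
  | [] => []
  | d :: rest => a :: gStarts (a + d - t) t rest

def gEnds (a t : Int) : List Int → List Int
  | [] => []
  | d :: rest => (a + d - 1) :: gEnds (a + d - t) t rest

def gTrans (a t : Int) : List Int → List (Int × Int)
  | [] => []
  | [_] => []
  | d :: rest => (a + d - t, a + d - 1) :: gTrans (a + d - t) t rest

def gAbs (a t : Int) : List Int → Int
  | [] => a
  | [_] => a
  | d :: rest => gAbs (a + d - t) t rest

-- A's loop, fully characterised.
theorem A_loop (t : Int) (l : List Int) : ∀ (k : Int) (n : Int) (S E : List Int)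
    (T : List (Int × Int)) (a : Int), n = k + l.length →
    (PySem.List.enumerate l k).foldl (stepA n t) (S, E, T, a) =
      (S ++ gStarts a t l, E ++ gEnds a t l, T ++ gTrans a t l, gAbs a t l) := by
  induction l with
  | nil => intro k n S E T a h; simp [PySem.List.enumerate_nil, gStarts, gEnds, gTrans, gAbs]
  | cons d rest ih =>
    intro k n S E T a h
    rw [PySem.List.enumerate_cons, List.foldl_cons]
    cases rest with
    | nil =>
      have hc : ¬ (k < n - 1) := by simp at h; omega
      simp [stepA, hc, PySem.List.enumerate_nil, gStarts, gEnds, gTrans, gAbs]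
    | cons r rs =>
      have hc : k < n - 1 := by simp at h; omega
      have hstep : stepA n t (S, E, T, a) (k, d) =
          (S ++ [a], E ++ [a + d - 1], T ++ [(a + d - t, a + d - 1)], a + d - t) := by
        simp [stepA, hc]
      rw [hstep, ih (k + 1) n (S ++ [a]) (E ++ [a + d - 1])
            (T ++ [(a + d - t, a + d - 1)]) (a + d - t) (by simp at h ⊢; omega)]
      simp [gStarts, gEnds, gTrans, gAbs]

-- running-sum scan, the abstract shape of B's prefix list (without its leading 0)
def scanFrom (s : Int) : List Int → List Int
  | [] => []
  | d :: rest => (s + d) :: scanFrom (s + d) rest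

theorem pfx_char (l : List Int) : ∀ (acc : List Int) (s : Int),
    PySem.List.pyGetD acc (-1) 0 = s →
    l.foldl (fun (p : List Int) d => p ++ [PySem.List.pyGetD p (-1) 0 + d]) acc =
      acc ++ scanFrom s l := by
  induction l with
  | nil => intro acc s h; simp [scanFrom]
  | cons d rest ih =>
    intro acc s h
    rw [List.foldl_cons, h, ih (acc ++ [s + d]) (s + d)
        (PySem.List.pyGetD_neg_one_append_singleton acc (s + d) 0)]
    simp [scanFrom]

theorem pyGetD_neg_one_cons_cons (x y : Int) (ys : List Int) :
    PySem.List.pyGetD (x :: y :: ys) (-1) 0 = PySem.List.pyGetD (y :: ys) (-1) 0 := by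
  rw [PySem.List.pyGetD_neg_one (x :: y :: ys) 0 (by simp),
      PySem.List.pyGetD_neg_one (y :: ys) 0 (by simp)]
  exact List.getLast_cons _

theorem last_scan (l : List Int) : ∀ (s : Int),
    PySem.List.pyGetD (s :: scanFrom s l) (-1) 0 = s + l.sum := by
  induction l with
  | nil =>
    intro s
    have h : ([] : List Int) ++ [s] = [s] := rfl
    rw [scanFrom, ← h, PySem.List.pyGetD_neg_one_append_singleton]
    simp
  | cons d rest ih =>
    intro s
    rw [scanFrom, pyGetD_neg_one_cons_cons, ih (s + d)]
    simp [List.sum_cons]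
    ring

theorem starts_char (l : List Int) : ∀ (s : Int) (k : Int) (t : Int),
    (PySem.List.enumerate ((s :: scanFrom s l).dropLast) k).map
      (fun q => q.2 - q.1 * t) = gStarts (s - k * t) t l := by
  induction l with
  | nil => intro s k t; simp [scanFrom, PySem.List.enumerate_nil, gStarts]
  | cons d rest ih =>
    intro s k t
    rw [scanFrom, List.dropLast_cons_of_ne_nil (by simp), PySem.List.enumerate_cons,
        List.map_cons, ih (s + d) (k + 1) t, gStarts]
    have : s + d - (k + 1) * t = s - k * t + d - t := by ring
    rw [this]

theorem ends_char (l : List Int) : ∀ (a t : Int),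
    ((gStarts a t l).zip l).map (fun q => q.1 + q.2 - 1) = gEnds a t l := by
  induction l with
  | nil => intro a t; simp [gStarts, gEnds]
  | cons d rest ih =>
    intro a t
    rw [gStarts, gEnds, List.zip_cons_cons, List.map_cons, ih]

theorem trans_char (l : List Int) : ∀ (a t : Int),
    (gEnds a t l).dropLast.map (fun e => (e - t + 1, e)) = gTrans a t l := by
  induction l with
  | nil => intro a t; simp [gEnds, gTrans]
  | cons d rest ih =>
    intro a t
    cases rest with
    | nil => simp [gEnds, gTrans]
    | cons r rs =>
      have hne : gEnds (a + d - t) t (r :: rs) ≠ [] := by simp [gEnds]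
      have e : a + d - 1 - t + 1 = a + d - t := by ring
      rw [gEnds, List.dropLast_cons_of_ne_nil hne, List.map_cons, ih, e]
      simp [gTrans]

theorem alt_char (l : List Int) (t : Int) :
    compute_timeline_alt l t =
      (gStarts 0 t l, gEnds 0 t l, gTrans 0 t l,
       l.sum - ((l.length : Int) - 1) * t) := by
  simp only [compute_timeline_alt]
  rw [pfx_char l [0] 0 (by
        have : ([] : List Int) ++ [(0 : Int)] = [0] := rfl
        rw [← this, PySem.List.pyGetD_neg_one_append_singleton])]
  have h0 : ([(0 : Int)] ++ scanFrom 0 l) = 0 :: scanFrom 0 l := rfl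
  rw [h0, last_scan l 0, starts_char l 0 0 t]
  have : (0 : Int) - 0 * t = 0 := by ring
  rw [this, ends_char l 0 t, trans_char l 0 t]
  norm_num

-- ===== VERDICT (by name: the statement is the Claim_ definition above) =====
theorem compute_timeline_spec : Claim_equal_compute_timeline := by
  intro l t _
  simp only [Spec_compute_timeline, compute_timeline]
  rw [A_loop t l 0 l.length [] [] [] 0 (by simp), alt_char l t]
  simp
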